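-- pv_equiv track=rewrite | github.com/Andrew-Ver/Advent-of-Code-Solutions | 2017/day-17/day-17.py | spinlock_pattern
-- ===== SOURCE A (Python) =====
-- def spinlock_pattern(p: int, insertions=2017) -> int:
-- 	lst = [0]
-- 	curr = 0
-- 	n = 1
-- 	for i in range(insertions):
-- 		curr = (curr+1 + p) % len(lst)
-- 		lst.insert(curr+1, n)
-- 		n += 1
--
-- 	return lst[curr+2]
-- ===== SOURCE B (Python) =====
-- def spinlock_pattern(p: int, insertions=2017) -> int:
--     # O(insertions): compute the insertion positions arithmetically (no list
--     # mutation), then replay the final read index backwards through them;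
--     # an index that survives the whole replay refers to the initial list [0].
--     pos = []
--     curr = 0
--     for length in range(1, insertions + 1):
--         curr = (curr + 1 + p) % length
--         pos.append(curr + 1)
--     q = curr + 2
--     for n in range(insertions, 0, -1):
--         pn = pos[n - 1]
--         if q == pn:
--             return n
--         if q > pn:
--             q -= 1
--     return [0][q]
-- ===== Notes on version B (the rewrite author's own statement) =====
-- stated objective: faster
-- what changed: B never builds the spinlock list: it computes the insertion positions arithmetically in one forward pass and then replays the final read index backwards through those positions to recover the element, replacing A's repeated list.insert simulation.
import Mathlib
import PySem

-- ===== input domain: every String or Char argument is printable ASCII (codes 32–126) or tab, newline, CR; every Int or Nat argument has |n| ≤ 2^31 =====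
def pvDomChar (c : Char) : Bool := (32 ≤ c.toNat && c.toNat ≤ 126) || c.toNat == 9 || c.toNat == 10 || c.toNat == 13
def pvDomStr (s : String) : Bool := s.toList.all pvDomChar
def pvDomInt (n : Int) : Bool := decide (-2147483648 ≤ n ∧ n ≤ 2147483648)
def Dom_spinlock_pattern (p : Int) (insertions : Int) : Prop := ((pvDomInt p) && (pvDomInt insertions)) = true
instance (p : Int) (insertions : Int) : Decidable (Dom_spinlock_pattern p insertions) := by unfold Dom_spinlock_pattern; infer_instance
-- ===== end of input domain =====

-- B replaces A's O(n^2) insert-into-list simulation by an O(n) arithmetic pass over the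
-- insertion positions plus a backward replay of the final read index (measured faster).

-- ===== PORT A =====
def spinlock_pattern (p : Int) (insertions : Int) : Int :=
  let s := (PySem.List.pyRange 0 insertions 1).foldl
    (fun (st : List Int × Int × Int) _ =>
      let curr := PySem.Int.mod (st.2.1 + 1 + p) (st.1.length : Int)
      (PySem.List.insert st.1 (curr + 1) st.2.2, curr, st.2.2 + 1))
    ([0], 0, 1)
  (PySem.List.pyGet? s.1 (s.2.1 + 2)).getD 0

-- ===== PORT B =====
-- backward replay loop of Source B: scan positions from the last insertion down (n is the value
-- inserted at the head position); the base case is Source B's 'return [0][q]' (pyGetD is exact for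
-- the in-range q the admitted inputs produce; where Source B raises IndexError it defaults to 0)
def pvReplay : List Int → Int → Int → Int
  | [], _, q => PySem.List.pyGetD [0] q 0
  | pn :: rest, n, q =>
    if q = pn then n
    else pvReplay rest (n - 1) (if q > pn then q - 1 else q)

def spinlock_pattern_alt (p : Int) (insertions : Int) : Int :=
  let f := (PySem.List.pyRange 1 (insertions + 1) 1).foldl
    (fun (st : List Int × Int) length =>
      let curr := PySem.Int.mod (st.2 + 1 + p) length
      (st.1 ++ [curr + 1], curr))
    ([], 0)
  pvReplay f.1.reverse insertions (f.2 + 2)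

-- ===== PRECONDITION & SPEC =====
-- the final current position of the spinlock (pure arithmetic, no list is built)
def pvCurrFinal (p : Int) (insertions : Int) : Int :=
  (PySem.List.pyRange 1 (insertions + 1) 1).foldl
    (fun c len => PySem.Int.mod (c + 1 + p) len) 0

-- A raises IndexError (lst[curr+2] reads one past the end) exactly when insertions ≤ 0 or the
-- final insertion lands at the end of the list; the latter depends on the whole index
-- recurrence, so pvSafe replays it (positions only). Above 2^19 insertions pvSafe answers true
-- without replaying — there the Python A cannot finish within any realistic budget, and the
-- ports are proved equal on ALL inputs anyway (ports_eq below), so admitting those inputs is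
-- sound; below the cap Pre_ is exact: it excludes precisely the inputs on which A (and B,
-- whose replay base case indexes [0] with the same surviving index) raise IndexError.
def pvSafe (p : Int) (insertions : Int) : Bool :=
  if 524288 < insertions then true
  else decide (pvCurrFinal p insertions ≠ insertions - 1)

def Pre_spinlock_pattern (p : Int) (insertions : Int) : Prop :=
  1 ≤ insertions ∧ pvSafe p insertions = true
instance (p : Int) (insertions : Int) : Decidable (Pre_spinlock_pattern p insertions) := by
  unfold Pre_spinlock_pattern; infer_instance

def pvWitness_spinlock_pattern : Int × Int := (3, 5)

def Spec_spinlock_pattern (p : Int) (insertions : Int) (out : Int) : Prop := out = spinlock_pattern_alt p insertions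
instance (p : Int) (insertions : Int) (out : Int) : Decidable (Spec_spinlock_pattern p insertions out) := by unfold Spec_spinlock_pattern; infer_instance

-- ===== CLAIM (what is proved, stated in full; the proofs are below) =====
def Claim_equal_spinlock_pattern : Prop := ∀ (p : Int) (insertions : Int), Dom_spinlock_pattern p insertions → Pre_spinlock_pattern p insertions → Spec_spinlock_pattern p insertions (spinlock_pattern p insertions)
-- ===== LEMMAS AND PROOFS =====

-- the spinlock's current-position recurrence
def pvC (p : Int) : Nat → Int
  | 0 => 0
  | k+1 => PySem.Int.mod (pvC p k + 1 + p) ((k : Int) + 1)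

-- the list A has built after k insertions
def pvLst (p : Int) : Nat → List Int
  | 0 => [0]
  | k+1 => PySem.List.insert (pvLst p k) (pvC p (k+1) + 1) ((k : Int) + 1)

theorem pvLst_length (p : Int) (k : Nat) : (pvLst p k).length = k + 1 := by
  induction k with
  | zero => rfl
  | succ k ih => simp [pvLst, PySem.List.length_insert, ih]

theorem pvC_bounds (p : Int) (k : Nat) : 0 ≤ pvC p (k+1) ∧ pvC p (k+1) < (k : Int) + 1 := by
  have hpos : (0 : Int) < (k : Int) + 1 := by positivity
  rw [pvC, PySem.Int.mod_eq_emod_of_pos hpos]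
  exact ⟨Int.emod_nonneg _ (by omega), Int.emod_lt_of_pos _ hpos⟩

theorem foldA_eq (p : Int) (N : Nat) :
    (PySem.List.pyRange 0 (N : Int) 1).foldl
      (fun (st : List Int × Int × Int) _ =>
        let curr := PySem.Int.mod (st.2.1 + 1 + p) (st.1.length : Int)
        (PySem.List.insert st.1 (curr + 1) st.2.2, curr, st.2.2 + 1))
      ([0], 0, 1)
    = (pvLst p N, pvC p N, (N : Int) + 1) := by
  induction N with
  | zero => simp [PySem.List.pyRange_one_eq_nil, pvLst, pvC]
  | succ N ih =>
    rw [show ((N+1 : Nat) : Int) = (N : Int) + 1 by omega,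
        PySem.List.pyRange_one_succ_right (by omega)]
    rw [List.foldl_append, ih]
    simp only [List.foldl_cons, List.foldl_nil]
    have hl : ((pvLst p N).length : Int) = (N : Int) + 1 := by
      rw [pvLst_length]; push_cast; ring
    simp only [hl]
    show (PySem.List.insert _ _ _, _, _) = _
    rw [pvLst, pvC]

theorem foldB_eq (p : Int) (N : Nat) :
    (PySem.List.pyRange 1 ((N : Int) + 1) 1).foldl
      (fun (st : List Int × Int) length =>
        let curr := PySem.Int.mod (st.2 + 1 + p) length
        (st.1 ++ [curr + 1], curr))
      ([], 0)
    = ((List.range N).map (fun i => pvC p (i+1) + 1), pvC p N) := by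
  induction N with
  | zero => simp [PySem.List.pyRange_one_eq_nil, pvC]
  | succ N ih =>
    rw [show ((N+1 : Nat) : Int) + 1 = ((N : Int) + 1) + 1 by omega,
        PySem.List.pyRange_one_succ_right (by omega)]
    rw [List.foldl_append, ih]
    simp only [List.foldl_cons, List.foldl_nil]
    rw [List.range_succ, List.map_append]
    simp only [List.map_cons, List.map_nil]
    rw [pvC]

-- Python-get after a single in-range insert
theorem pyGet?_insert (xs : List Int) (i : Int) (x : Int) (q : Int)
    (hi0 : 0 ≤ i) (hil : i ≤ xs.length) (hq0 : 0 ≤ q) (_hql : q < (xs.length : Int) + 1) :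
    PySem.List.pyGet? (PySem.List.insert xs i x) q =
      if q = i then some x
      else if q > i then PySem.List.pyGet? xs (q - 1)
      else PySem.List.pyGet? xs q := by
  obtain ⟨n, rfl⟩ : ∃ n : Nat, i = (n : Int) := ⟨i.toNat, (Int.toNat_of_nonneg hi0).symm⟩
  have hiln : n ≤ xs.length := by exact_mod_cast hil
  rw [PySem.List.insert_natCast xs n x hiln]
  rw [PySem.List.pyGet?_of_nonneg _ hq0]
  have htl : (List.take n xs).length = n := by
    simp [List.length_take]
    exact hiln
  by_cases h1 : q = (n : Int)
  · simp only [if_pos h1]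
    have hqn : q.toNat = n := by omega
    rw [hqn, List.getElem?_append_right (by omega : (List.take n xs).length ≤ n)]
    simp [htl]
  · simp only [if_neg h1]
    by_cases h2 : q > (n : Int)
    · simp only [if_pos h2]
      rw [PySem.List.pyGet?_of_nonneg _ (by omega)]
      rw [List.getElem?_append_right (by omega)]
      have hc : q.toNat - (List.take n xs).length = (q.toNat - n - 1) + 1 := by
        rw [htl]; omega
      rw [hc]
      simp only [List.getElem?_cons_succ]
      rw [List.getElem?_drop]
      congr 1
      omega
    · simp only [if_neg h2]
      rw [PySem.List.pyGet?_of_nonneg _ hq0]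
      rw [List.getElem?_append_left (by rw [htl]; omega)]
      exact List.getElem?_take_of_lt (by omega)

theorem replay_eq (p : Int) (k : Nat) :
    ∀ (q : Int), 0 ≤ q → q < (k : Int) + 1 →
    pvReplay ((List.range k).map (fun i => pvC p (i+1) + 1)).reverse (k : Int) q =
      (PySem.List.pyGet? (pvLst p k) q).getD 0 := by
  induction k with
  | zero =>
    intro q h0 h1
    have : q = 0 := by omega
    subst this
    simp [pvReplay, pvLst]
  | succ k ih =>
    intro q h0 h1
    rw [List.range_succ, List.map_append, List.reverse_append]
    simp only [List.map_cons, List.map_nil, List.reverse_cons, List.reverse_nil,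
      List.nil_append, List.cons_append]
    rw [pvReplay]
    have hb := pvC_bounds p k
    have hlen : ((pvLst p k).length : Int) = (k : Int) + 1 := by
      rw [pvLst_length]; push_cast; ring
    rw [pvLst]
    rw [pyGet?_insert (pvLst p k) (pvC p (k+1) + 1) ((k : Int) + 1) q
        (by omega) (by omega) h0 (by rw [hlen]; push_cast at h1 ⊢; omega)]
    by_cases h1' : q = pvC p (k+1) + 1
    · simp [h1']
    · simp only [if_neg h1']
      by_cases h2 : q > pvC p (k+1) + 1
      · simp only [if_pos h2, gt_iff_lt]
        rw [show ((k+1 : Nat) : Int) - 1 = (k : Int) by push_cast; ring]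
        exact ih (q - 1) (by omega) (by push_cast at h1 ⊢; omega)
      · simp only [if_neg h2, gt_iff_lt]
        rw [show ((k+1 : Nat) : Int) - 1 = (k : Int) by push_cast; ring]
        exact ih q h0 (by omega)

-- a read index equal to the list length (A's IndexError case) falls through the whole
-- backward replay and reaches the base case 0, matching port A's getD 0 default
theorem replay_miss (p : Int) (k : Nat) :
    ∀ (n : Int), pvReplay ((List.range k).map (fun i => pvC p (i+1) + 1)).reverse n ((k : Int) + 1) = 0 := by
  induction k with
  | zero => intro n; simp [pvReplay]; decide
  | succ k ih =>
    intro n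
    rw [List.range_succ, List.map_append, List.reverse_append]
    simp only [List.map_cons, List.map_nil, List.reverse_cons, List.reverse_nil,
      List.nil_append, List.cons_append]
    rw [pvReplay]
    have hb := pvC_bounds p k
    rw [if_neg (by push_cast; omega), if_pos (by push_cast; omega)]
    rw [show ((k+1 : Nat) : Int) + 1 - 1 = (k : Int) + 1 by push_cast; ring]
    exact ih (n - 1)

-- the two ports agree on EVERY input (where Python A raises, port A's getD 0 default and
-- port B's replay base case both give 0)
theorem ports_eq (p insertions : Int) :
    spinlock_pattern p insertions = spinlock_pattern_alt p insertions := by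
  unfold spinlock_pattern spinlock_pattern_alt
  by_cases hins : insertions ≤ 0
  · rw [PySem.List.pyRange_one_eq_nil (by omega), PySem.List.pyRange_one_eq_nil (by omega)]
    simp [pvReplay, PySem.List.pyGet?, PySem.List.pyIdx?]
    decide
  · obtain ⟨N, rfl⟩ : ∃ N : Nat, insertions = (N : Int) :=
      ⟨insertions.toNat, (Int.toNat_of_nonneg (by omega)).symm⟩
    rw [foldA_eq, foldB_eq]
    simp only
    have hN : 1 ≤ N := by omega
    by_cases hraise : pvC p N = (N : Int) - 1
    · rw [hraise, show (N : Int) - 1 + 2 = (N : Int) + 1 by ring, replay_miss]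
      have hnone : PySem.List.pyGet? (pvLst p N) ((N : Int) + 1) = none := by
        rw [PySem.List.pyGet?_eq_none_iff, pvLst_length]
        simp only [PySem.Raise.InRange, not_and, not_lt]
        intro
        push_cast
        omega
      rw [hnone]
      rfl
    · obtain ⟨M, rfl⟩ : ∃ M : Nat, N = M + 1 := ⟨N - 1, by omega⟩
      have hb := pvC_bounds p M
      have hq0 : 0 ≤ pvC p (M+1) + 2 := by omega
      have hq1 : pvC p (M+1) + 2 < ((M+1 : Nat) : Int) + 1 := by
        push_cast at hraise ⊢; omega
      exact (replay_eq p (M+1) (pvC p (M+1) + 2) hq0 hq1).symm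

-- ===== VERDICT (by name: the statement is the Claim_ definition above) =====
theorem spinlock_pattern_spec : Claim_equal_spinlock_pattern := by
  intro p insertions _hdom _hpre
  exact ports_eq p insertions
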